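-- pv_equiv track=rewrite | github.com/georgdonner/led-matrix | weather.py | temp_width
-- ===== SOURCE A (Python) =====
-- def temp_width(temp):
--     width = 0
--     for c in temp:
--         if c == '.':
--             width += 3
--         elif c == '1':
--             width += 4
--         else:
--             width += 6
--     return width - 1
-- ===== SOURCE B (Python) =====
-- def temp_width(temp):
--     # closed-form: every char contributes 6, except '.' (3) and '1' (4)
--     return 6 * len(temp) - 3 * temp.count('.') - 2 * temp.count('1') - 1
-- ===== Notes on version B (the rewrite author's own statement) =====
-- stated objective: faster
-- what changed: Replaced the per-character branching loop with a closed-form arithmetic expression over the string length and the counts of the two special characters (C-level str.count instead of a Python-level loop).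
import Mathlib
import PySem

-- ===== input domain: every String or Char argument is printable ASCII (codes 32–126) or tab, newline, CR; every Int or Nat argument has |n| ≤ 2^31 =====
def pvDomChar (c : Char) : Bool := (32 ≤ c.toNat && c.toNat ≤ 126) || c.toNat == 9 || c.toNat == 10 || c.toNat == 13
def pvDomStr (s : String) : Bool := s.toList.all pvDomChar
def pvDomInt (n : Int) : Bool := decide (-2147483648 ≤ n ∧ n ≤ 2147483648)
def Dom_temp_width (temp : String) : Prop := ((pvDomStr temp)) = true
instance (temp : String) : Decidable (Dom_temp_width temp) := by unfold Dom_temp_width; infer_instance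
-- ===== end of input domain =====

-- B replaces A's per-character branching loop with a closed-form expression
-- over len(temp) and the counts of '.' and '1' (objective: simpler).


-- ===== PORT A =====
def temp_width (temp : String) : Int :=
  let width : Int := temp.toList.foldl
    (fun width c =>
      if c == '.' then width + 3
      else if c == '1' then width + 4
      else width + 6) 0
  width - 1

-- ===== PORT B =====
-- temp.count('.') with a one-character argument is exact as PySem.Str.count
def temp_width_alt (temp : String) : Int :=
  6 * PySem.Str.len temp - 3 * (PySem.Str.count temp "." : Int)
    - 2 * (PySem.Str.count temp "1" : Int) - 1

-- ===== PRECONDITION & SPEC =====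
def Spec_temp_width (temp : String) (out : Int) : Prop := out = temp_width_alt temp
instance (temp : String) (out : Int) : Decidable (Spec_temp_width temp out) := by unfold Spec_temp_width; infer_instance

-- ===== CLAIM (what is proved, stated in full; the proofs are below) =====
def Claim_equal_temp_width : Prop := ∀ (temp : String), Dom_temp_width temp → Spec_temp_width temp (temp_width temp)

-- ===== LEMMAS AND PROOFS =====

-- one-character substring count is plain character count
theorem chars_count_go_singleton (c : Char) (s : List Char) (acc fuel : Nat)
    (h : s.length ≤ fuel) :
    PySem.Chars.count.go [c] fuel s acc = acc + s.count c := by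
  induction s generalizing fuel acc with
  | nil =>
      cases fuel <;> simp [PySem.Chars.count.go]
  | cons hd t ih =>
      cases fuel with
      | zero => simp at h
      | succ f =>
        simp only [List.length_cons, Nat.succ_le_succ_iff] at h
        by_cases hc : hd = c
        · subst hc
          simp [PySem.Chars.count.go, List.isPrefixOf, ih _ _ h, List.count_cons]
          omega
        · have : List.isPrefixOf [c] (hd :: t) = false := by
            simp [List.isPrefixOf]; exact fun e => (hc e.symm).elim
          simp [PySem.Chars.count.go, this, ih _ _ h, List.count_cons, hc]

theorem chars_count_singleton (s : List Char) (c : Char) :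
    PySem.Chars.count s [c] = s.count c := by
  simp [PySem.Chars.count, chars_count_go_singleton c s 0 s.length le_rfl]

theorem foldl_width (l : List Char) (a : Int) :
    l.foldl (fun width c =>
      if c == '.' then width + 3
      else if c == '1' then width + 4
      else width + 6) a
    = a + 6 * l.length - 3 * l.count '.' - 2 * l.count '1' := by
  induction l generalizing a with
  | nil => simp
  | cons hd t ih =>
      simp only [List.foldl_cons, ih, List.length_cons, List.count_cons]
      by_cases h1 : hd = '.' <;> by_cases h2 : hd = '1' <;>
        simp [h1, h2] <;> ring

-- ===== VERDICT (by name: the statement is the Claim_ definition above) =====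
theorem temp_width_spec : Claim_equal_temp_width := by
  intro temp _
  unfold Spec_temp_width temp_width temp_width_alt
  simp only [PySem.Str.count, PySem.Str.len_eq, foldl_width]
  rw [show (".".toList) = ['.'] from rfl, show ("1".toList) = ['1'] from rfl,
    chars_count_singleton, chars_count_singleton]
  ring
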